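-- pv_equiv track=rewrite | github.com/Bigazzon/AoE_2023 | Challenges/14/2023_14.py | count_output
-- ===== SOURCE A (Python) =====
-- def count_output(round, square, length):
--     counter = 0
--     for r, s in zip(round, square):
--         for i in range(len(r)):
--             if r[i] == 0:
--                 continue
--             for j in range(r[i]):
--                 counter += length - s[i] - j
--     return counter
-- ===== SOURCE B (Python) =====
-- def count_output(round, square, length):
--     total = 0
--     for r, s in zip(round, square):
--         for i, n in enumerate(r):
--             if n > 0:
--                 total += n * (length - s[i]) - n * (n - 1) // 2
--     return total
-- ===== Notes on version B (the rewrite author's own statement) =====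
-- stated objective: faster
-- what changed: replaces the innermost range(r[i]) accumulation loop by the closed-form arithmetic-series value n*(length-s[i]) - n*(n-1)//2 per cell, iterating each row with enumerate
import Mathlib
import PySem

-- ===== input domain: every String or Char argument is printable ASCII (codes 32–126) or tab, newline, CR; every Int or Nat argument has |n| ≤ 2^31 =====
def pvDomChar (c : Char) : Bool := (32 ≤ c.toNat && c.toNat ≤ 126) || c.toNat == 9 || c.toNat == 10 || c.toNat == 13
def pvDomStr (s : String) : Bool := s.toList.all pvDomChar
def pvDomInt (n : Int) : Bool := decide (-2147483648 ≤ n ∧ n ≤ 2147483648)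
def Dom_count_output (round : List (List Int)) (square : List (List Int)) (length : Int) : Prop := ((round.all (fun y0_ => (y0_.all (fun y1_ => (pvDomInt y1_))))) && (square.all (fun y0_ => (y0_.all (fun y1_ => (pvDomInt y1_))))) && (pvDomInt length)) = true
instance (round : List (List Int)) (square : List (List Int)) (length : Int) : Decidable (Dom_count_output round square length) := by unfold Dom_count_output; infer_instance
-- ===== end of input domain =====

-- B replaces the innermost range(r[i]) accumulation by the closed-form arithmetic series
-- n*(length-s[i]) - n*(n-1)//2 per cell, iterating each row with enumerate (faster).


-- ===== PORT A =====
def count_output (round : List (List Int)) (square : List (List Int)) (length : Int) : Int :=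
  (round.zip square).foldl (fun counter rs =>
    (PySem.List.pyRange 0 (rs.1.length : Int) 1).foldl (fun c i =>
      if PySem.List.pyGetD rs.1 i 0 = 0 then c
      else (PySem.List.pyRange 0 (PySem.List.pyGetD rs.1 i 0) 1).foldl (fun c2 j =>
        c2 + (length - PySem.List.pyGetD rs.2 i 0 - j)) c) counter) 0

-- ===== PORT B =====
def count_output_alt (round : List (List Int)) (square : List (List Int)) (length : Int) : Int :=
  (round.zip square).foldl (fun total rs =>
    (PySem.List.enumerate rs.1).foldl (fun t p =>
      if p.2 > 0 then
        t + (p.2 * (length - PySem.List.pyGetD rs.2 p.1 0)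
             - PySem.Int.floordiv (p.2 * (p.2 - 1)) 2)
      else t) total) 0

-- ===== PRECONDITION & SPEC =====
-- Pre_ excludes exactly the inputs where Python A (and Python B alike) raises IndexError:
-- a row pair in which some positive r[i] sits at an index beyond the end of the square row s.
def Pre_count_output (round : List (List Int)) (square : List (List Int)) (length : Int) : Prop :=
  ∀ p ∈ round.zip square, ∀ x ∈ p.1.drop p.2.length, x ≤ 0
instance (round : List (List Int)) (square : List (List Int)) (length : Int) : Decidable (Pre_count_output round square length) := by unfold Pre_count_output; infer_instance

def pvWitness_count_output : List (List Int) × List (List Int) × Int := ([[1, 0], [3]], [[3, 4], [0]], 10)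

def Spec_count_output (round : List (List Int)) (square : List (List Int)) (length : Int) (out : Int) : Prop := out = count_output_alt round square length
instance (round : List (List Int)) (square : List (List Int)) (length : Int) (out : Int) : Decidable (Spec_count_output round square length out) := by unfold Spec_count_output; infer_instance

-- ===== CLAIM (what is proved, stated in full; the proofs are below) =====
def Claim_equal_count_output : Prop := ∀ (round : List (List Int)) (square : List (List Int)) (length : Int), Dom_count_output round square length → Pre_count_output round square length → Spec_count_output round square length (count_output round square length)

-- ===== LEMMAS AND PROOFS =====

-- arithmetic series: sum_{j=0}^{n-1} (a - j) = n*a - n*(n-1)/2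
theorem pv_series (n : Nat) (a c : Int) :
    (PySem.List.pyRange 0 (n : Int) 1).foldl (fun c2 j => c2 + (a - j)) c
      = c + ((n : Int) * a - PySem.Int.floordiv ((n : Int) * ((n : Int) - 1)) 2) := by
  induction n generalizing c with
  | zero => simp [PySem.List.pyRange_one_eq_nil, PySem.Int.floordiv]
  | succ m ih =>
    have h : ((m + 1 : Nat) : Int) = (m : Int) + 1 := by push_cast; ring
    rw [h, PySem.List.pyRange_one_succ_right (by positivity), List.foldl_append, ih]
    simp only [List.foldl_cons, List.foldl_nil]
    obtain ⟨k, hk⟩ := Int.even_mul_succ_self ((m : Int) - 1)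
    have h1 : (m : Int) * ((m : Int) - 1) = 2 * k := by linarith
    have h2 : ((m : Int) + 1) * (((m : Int) + 1) - 1) = 2 * (k + m) := by linarith [hk]
    rw [PySem.Int.floordiv_eq_ediv_of_pos (by norm_num : (0:Int) < 2),
        PySem.Int.floordiv_eq_ediv_of_pos (by norm_num : (0:Int) < 2), h1, h2,
        Int.mul_ediv_cancel_left _ (by norm_num), Int.mul_ediv_cancel_left _ (by norm_num)]
    ring

-- per-cell equality: A's inner series loop over range(n) equals B's closed form, n = r[i], si = s[i]
theorem pv_cell (L c n si : Int) :
    (if n = 0 then c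
     else (PySem.List.pyRange 0 n 1).foldl (fun c2 j => c2 + (L - si - j)) c)
      = (if n > 0 then c + (n * (L - si) - PySem.Int.floordiv (n * (n - 1)) 2) else c) := by
  rcases lt_trichotomy n 0 with hlt | heq | hgt
  · rw [if_neg (by omega), if_neg (by omega), PySem.List.pyRange_one_eq_nil (by omega)]
    rfl
  · simp [heq]
  · rw [if_neg (by omega), if_pos hgt]
    have hn : ((n.toNat : Nat) : Int) = n := Int.toNat_of_nonneg (le_of_lt hgt)
    rw [← hn, pv_series n.toNat (L - si) c]

-- row equality: A's indexed row loop equals B's enumerate fold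
theorem pv_row (r s : List Int) (L c : Int) :
    (PySem.List.pyRange 0 (r.length : Int) 1).foldl (fun c i =>
        if PySem.List.pyGetD r i 0 = 0 then c
        else (PySem.List.pyRange 0 (PySem.List.pyGetD r i 0) 1).foldl (fun c2 j =>
          c2 + (L - PySem.List.pyGetD s i 0 - j)) c) c
      = (PySem.List.enumerate r).foldl (fun t p =>
          if p.2 > 0 then
            t + (p.2 * (L - PySem.List.pyGetD s p.1 0)
                 - PySem.Int.floordiv (p.2 * (p.2 - 1)) 2)
          else t) c := by
  rw [PySem.List.enumerate_eq_map_pyRange r 0, List.foldl_map]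
  have hlen : PySem.List.len r = (r.length : Int) := by simp [PySem.List.len]
  rw [hlen]
  exact PySem.List.foldl_congr_mem _ _ _ c
    (fun acc i _ => pv_cell L acc (PySem.List.pyGetD r i 0) (PySem.List.pyGetD s i 0))

-- ===== VERDICT (by name: the statement is the Claim_ definition above) =====
theorem count_output_spec : Claim_equal_count_output := by
  intro round square length _ _
  unfold Spec_count_output count_output count_output_alt
  exact PySem.List.foldl_congr_mem _ _ _ 0
    (fun acc p _ => pv_row p.1 p.2 length acc)
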